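-- pv_equiv track=rewrite | github.com/haolunc/ARC-RL | reference_solutions/solutions/2c608aff.py | transform
-- ===== SOURCE A (Python) =====
-- def transform(grid):
--
--     out = [row[:] for row in grid]
--     h, w = len(grid), len(grid[0])
--
--     from collections import Counter, deque
--     flat = [c for row in grid for c in row]
--     background = Counter(flat).most_common(1)[0][0]
--
--     visited = [[False] * w for _ in range(h)]
--     single_cells = []
--
--     for i in range(h):
--         for j in range(w):
--             if visited[i][j] or out[i][j] == background:
--                 continue
--             colour = out[i][j]
--
--             q = deque()
--             q.append((i, j))
--             visited[i][j] = True
--             comp = [(i, j)]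
--             while q:
--                 ci, cj = q.popleft()
--                 for di, dj in ((1,0),(-1,0),(0,1),(0,-1)):
--                     ni, nj = ci+di, cj+dj
--                     if 0 <= ni < h and 0 <= nj < w and not visited[ni][nj]:
--                         if out[ni][nj] == colour:
--                             visited[ni][nj] = True
--                             q.append((ni, nj))
--                             comp.append((ni, nj))
--             if len(comp) == 1:
--                 single_cells.append((i, j, colour))
--
--     for i, j, colour in single_cells:
--         for di, dj in ((1,0), (-1,0), (0,1), (0,-1)):
--             step = 1
--             while True:
--                 ni, nj = i + di*step, j + dj*step
--                 if not (0 <= ni < h and 0 <= nj < w):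
--
--                     break
--                 cur = out[ni][nj]
--                 if cur == background:
--
--                     step += 1
--                     continue
--                 if cur == colour:
--
--                     break
--
--                 for k in range(1, step):
--                     out[i + di*k][j + dj*k] = colour
--                 break
--
--     return out
-- ===== SOURCE B (Python) =====
-- def transform(grid):
--     out = [row[:] for row in grid]
--     h, w = len(grid), len(grid[0])
--
--     from collections import Counter
--     flat = [c for row in grid for c in row]
--     background = Counter(flat).most_common(1)[0][0]
--
--     # Phase 1: a cell is "single" iff it is not background and no in-bounds
--     # orthogonal neighbour has the same colour (equivalent to a size-1
--     # 4-connected component); collected in row-major order.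
--     single_cells = [
--         (i, j, out[i][j])
--         for i in range(h)
--         for j in range(w)
--         if out[i][j] != background
--         and not any(0 <= i + di < h and 0 <= j + dj < w and out[i + di][j + dj] == out[i][j]
--                     for di, dj in ((1, 0), (-1, 0), (0, 1), (0, -1)))
--     ]
--
--     # Phase 2: identical ray-shooting over the mutable `out`.
--     for i, j, colour in single_cells:
--         for di, dj in ((1, 0), (-1, 0), (0, 1), (0, -1)):
--             step = 1
--             while True:
--                 ni, nj = i + di * step, j + dj * step
--                 if not (0 <= ni < h and 0 <= nj < w):
--                     break
--                 cur = out[ni][nj]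
--                 if cur == background:
--                     step += 1
--                     continue
--                 if cur == colour:
--                     break
--                 for k in range(1, step):
--                     out[i + di * k][j + dj * k] = colour
--                 break
--
--     return out
-- ===== Notes on version B (the rewrite author's own statement) =====
-- stated objective: simpler
-- what changed: Phase 1's BFS flood-fill with a visited array and deque is replaced by a direct local test (a non-background cell is 'single' iff no in-bounds orthogonal neighbour has its colour, which characterises size-1 4-connected components), collected by a single row-major comprehension; phase 2 is unchanged.
import Mathlib
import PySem

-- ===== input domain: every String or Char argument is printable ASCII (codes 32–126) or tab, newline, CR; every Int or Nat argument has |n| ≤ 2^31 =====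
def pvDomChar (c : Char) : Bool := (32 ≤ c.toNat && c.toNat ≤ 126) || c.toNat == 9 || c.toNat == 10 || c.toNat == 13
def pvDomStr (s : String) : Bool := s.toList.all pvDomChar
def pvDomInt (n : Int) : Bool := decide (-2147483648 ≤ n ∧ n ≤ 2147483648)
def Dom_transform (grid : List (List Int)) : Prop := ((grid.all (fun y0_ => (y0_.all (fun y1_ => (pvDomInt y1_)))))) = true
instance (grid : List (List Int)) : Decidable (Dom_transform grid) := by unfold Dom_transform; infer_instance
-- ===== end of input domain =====

-- B replaces A's BFS flood-fill in phase 1 by a direct local neighbour test (a non-background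
-- cell is single iff no in-bounds orthogonal neighbour has its colour); phase 2 is unchanged.

-- ===== shared helpers (code both Source A and Source B contain verbatim) =====

-- out[i][j] / visited[i][j]: every read below is guarded by 0 ≤ i < h ∧ 0 ≤ j < w, where this
-- equals Python's indexing exactly; the default is never reached on admitted inputs.
def gget (g : List (List Int)) (i j : Int) : Int :=
  PySem.List.pyGetD (PySem.List.pyGetD g i []) j 0

def vget (V : List (List Bool)) (i j : Int) : Bool :=
  PySem.List.pyGetD (PySem.List.pyGetD V i []) j false

-- visited[i][j] = True / out[i][j] = v for indices with 0 ≤ i, 0 ≤ j (the only uses), exact there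
def vset (V : List (List Bool)) (i j : Int) : List (List Bool) :=
  V.modify i.toNat (fun r => r.set j.toNat true)

def oset (g : List (List Int)) (i j v : Int) : List (List Int) :=
  g.modify i.toNat (fun r => r.set j.toNat v)

def pyDirs : List (Int × Int) := [(1,0),(-1,0),(0,1),(0,-1)]

-- Counter(flat).most_common(1)[0][0]: counts in first-insertion order, then the first key of
-- maximal count (heapq.nlargest(1, …) is stable). The [] branch is Python's IndexError, outside Pre_.
def pvBackground (flat : List Int) : Int :=
  let counter := flat.foldl (fun (d : PySem.Dict Int Int) c => d.modify c 0 (· + 1)) PySem.Dict.empty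
  match counter.items with
  | [] => 0
  | p :: rest => (rest.foldl (fun best q => if best.2 < q.2 then q else best) p).1

-- phase 2 (identical in Source A and Source B, hence shared): the `for k in range(1, step)` fill
def fillGap (out : List (List Int)) (i j colour di dj step : Int) : List (List Int) :=
  (PySem.List.pyRange 1 step 1).foldl (fun o k => oset o (i + di * k) (j + dj * k) colour) out

-- the `while True` ray; fuel h+w+2 is never exhausted: the loop runs only while i+di*step stays
-- in bounds, so step never exceeds max(h,w)+1
def rayLoop (h w background i j colour di dj : Int) :
    Nat → Int → List (List Int) → List (List Int)
  | 0, _, out => out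
  | fuel + 1, step, out =>
    let ni := i + di * step
    let nj := j + dj * step
    if ¬(0 ≤ ni ∧ ni < h ∧ 0 ≤ nj ∧ nj < w) then out
    else if gget out ni nj = background then
      rayLoop h w background i j colour di dj fuel (step + 1) out
    else if gget out ni nj = colour then out
    else fillGap out i j colour di dj step

def phase2 (h w background : Int) (singles : List (Int × Int × Int))
    (out : List (List Int)) : List (List Int) :=
  singles.foldl (fun o c =>
    pyDirs.foldl (fun o d =>
      rayLoop h w background c.1 c.2.1 c.2.2 d.1 d.2 (h.toNat + w.toNat + 2) 1 o) o) out

-- ===== PORT A =====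

-- one `for di, dj` neighbour check of A's BFS; state = (visited, q, comp)
def bfsStep (out : List (List Int)) (h w colour ci cj : Int)
    (st : List (List Bool) × List (Int × Int) × List (Int × Int)) (d : Int × Int) :
    List (List Bool) × List (Int × Int) × List (Int × Int) :=
  let ni := ci + d.1
  let nj := cj + d.2
  if 0 ≤ ni ∧ ni < h ∧ 0 ≤ nj ∧ nj < w ∧ vget st.1 ni nj = false then
    if gget out ni nj = colour then
      (vset st.1 ni nj, st.2.1 ++ [(ni, nj)], st.2.2 ++ [(ni, nj)])
    else st
  else st

def bfsNbrs (out : List (List Int)) (h w colour ci cj : Int)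
    (st : List (List Bool) × List (Int × Int) × List (Int × Int)) :
    List (List Bool) × List (Int × Int) × List (Int × Int) :=
  pyDirs.foldl (bfsStep out h w colour ci cj) st

-- A's `while q` BFS loop; fuel h*w+1 is never exhausted: each iteration pops one queue entry and
-- every push marks a previously unvisited cell visited, so q.length + #unvisited strictly decreases
def bfsLoop (out : List (List Int)) (h w colour : Int) :
    Nat → List (List Bool) → List (Int × Int) → List (Int × Int) →
    List (List Bool) × List (Int × Int)
  | 0, V, _q, comp => (V, comp)
  | fuel + 1, V, q, comp =>
    match q with
    | [] => (V, comp)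
    | (ci, cj) :: q' =>
      let st := bfsNbrs out h w colour ci cj (V, q', comp)
      bfsLoop out h w colour fuel st.1 st.2.1 st.2.2

-- the body of A's scan at cell (i, j); state = (visited, single_cells)
def scanStepA (out : List (List Int)) (h w background : Int)
    (st : List (List Bool) × List (Int × Int × Int)) (p : Int × Int) :
    List (List Bool) × List (Int × Int × Int) :=
  if vget st.1 p.1 p.2 = true ∨ gget out p.1 p.2 = background then st
  else
    let colour := gget out p.1 p.2
    let r := bfsLoop out h w colour (h.toNat * w.toNat + 1)
      (vset st.1 p.1 p.2) [(p.1, p.2)] [(p.1, p.2)]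
    if r.2.length = 1 then (r.1, st.2 ++ [(p.1, p.2, colour)]) else (r.1, st.2)

def phase1A (out : List (List Int)) (h w background : Int) : List (Int × Int × Int) :=
  ((PySem.List.pyRange 0 h 1).foldl (fun st i =>
      (PySem.List.pyRange 0 w 1).foldl (fun st j => scanStepA out h w background st (i, j)) st)
    (List.replicate h.toNat (List.replicate w.toNat false), [])).2

def transform (grid : List (List Int)) : List (List Int) :=
  let h : Int := grid.length
  let w : Int := (PySem.List.pyGetD grid 0 []).length
  let background := pvBackground grid.flatten
  phase2 h w background (phase1A grid h w background) grid

-- ===== PORT B =====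

-- B's local test: some in-bounds orthogonal neighbour has this colour
def hasNbrB (out : List (List Int)) (h w i j colour : Int) : Bool :=
  pyDirs.any (fun d =>
    decide (0 ≤ i + d.1 ∧ i + d.1 < h ∧ 0 ≤ j + d.2 ∧ j + d.2 < w ∧
            gget out (i + d.1) (j + d.2) = colour))

def scanStepB (out : List (List Int)) (h w background : Int)
    (s : List (Int × Int × Int)) (p : Int × Int) : List (Int × Int × Int) :=
  if gget out p.1 p.2 = background then s
  else if hasNbrB out h w p.1 p.2 (gget out p.1 p.2) then s
  else s ++ [(p.1, p.2, gget out p.1 p.2)]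

def phase1B (out : List (List Int)) (h w background : Int) : List (Int × Int × Int) :=
  (PySem.List.pyRange 0 h 1).foldl (fun s i =>
    (PySem.List.pyRange 0 w 1).foldl (fun s j => scanStepB out h w background s (i, j)) s) []

def transform_alt (grid : List (List Int)) : List (List Int) :=
  let h : Int := grid.length
  let w : Int := (PySem.List.pyGetD grid 0 []).length
  let background := pvBackground grid.flatten
  phase2 h w background (phase1B grid h w background) grid

-- ===== PRECONDITION & SPEC =====
-- Exactly the inputs on which A returns: a nonempty grid with at least one cell whose rows are all
-- at least as long as the first (otherwise len(grid[0]), most_common(1)[0] or out[i][j] raises).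
def Pre_transform (grid : List (List Int)) : Prop :=
  grid ≠ [] ∧ grid.flatten ≠ [] ∧
    ∀ r ∈ grid, (PySem.List.pyGetD grid 0 []).length ≤ r.length
instance (grid : List (List Int)) : Decidable (Pre_transform grid) := by
  unfold Pre_transform; infer_instance
def pvWitness_transform : List (List Int) := [[1]]

def Spec_transform (grid : List (List Int)) (out : List (List Int)) : Prop := out = transform_alt grid
instance (grid : List (List Int)) (out : List (List Int)) : Decidable (Spec_transform grid out) := by unfold Spec_transform; infer_instance

-- ===== CLAIM (what is proved, stated in full; the proofs are below) =====
def Claim_equal_transform : Prop := ∀ (grid : List (List Int)), Dom_transform grid → Pre_transform grid → Spec_transform grid (transform grid)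

-- ===== LEMMAS AND PROOFS =====

def inb (h w : Int) (p : Int × Int) : Prop := 0 ≤ p.1 ∧ p.1 < h ∧ 0 ≤ p.2 ∧ p.2 < w

def vAt (V : List (List Bool)) (p : Int × Int) : Prop := vget V p.1 p.2 = true

def dims (h w : Int) (V : List (List Bool)) : Prop :=
  V.length = h.toNat ∧ ∀ r ∈ V, r.length = w.toNat

def countFalse (V : List (List Bool)) : Nat := (V.map (fun r => r.count false)).sum

def sameNbr (out : List (List Int)) (h w : Int) (p : Int × Int) : Prop :=
  ∃ d ∈ pyDirs, inb h w (p.1 + d.1, p.2 + d.2) ∧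
    gget out (p.1 + d.1) (p.2 + d.2) = gget out p.1 p.2

def clos (out : List (List Int)) (h w : Int) (V : List (List Bool)) : Prop :=
  ∀ p, inb h w p → vAt V p → ∀ d ∈ pyDirs, inb h w (p.1 + d.1, p.2 + d.2) →
    gget out (p.1 + d.1) (p.2 + d.2) = gget out p.1 p.2 → vAt V (p.1 + d.1, p.2 + d.2)

lemma dims_vset (h w : Int) (V : List (List Bool)) (p : Int × Int) (hd : dims h w V) :
    dims h w (vset V p.1 p.2) := by
  obtain ⟨hlen, hrows⟩ := hd
  refine ⟨by simpa [vset] using hlen, ?_⟩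
  intro r hr
  rw [List.mem_iff_getElem] at hr
  obtain ⟨k, hk, rfl⟩ := hr
  simp only [vset, List.getElem_modify]
  split
  · rw [List.length_set]; exact hrows _ (List.getElem_mem _)
  · exact hrows _ (List.getElem_mem _)

lemma vget_getElem (V : List (List Bool)) (q : Int × Int)
    (hq1 : 0 ≤ q.1) (hq3 : 0 ≤ q.2)
    (h1 : q.1.toNat < V.length)
    (h2 : q.2.toNat < (V[q.1.toNat]'h1).length) :
    vget V q.1 q.2 = (V[q.1.toNat]'h1)[q.2.toNat]'h2 := by
  rw [vget]
  have hrow : PySem.List.pyGetD V q.1 ([] : List Bool) = V[q.1.toNat]'h1 := by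
    rw [PySem.List.pyGetD, PySem.List.pyGet?_of_nonneg _ hq1, List.getElem?_eq_getElem h1]; rfl
  rw [hrow, PySem.List.pyGetD, PySem.List.pyGet?_of_nonneg _ hq3, List.getElem?_eq_getElem h2]
  rfl

lemma vAt_vset (h w : Int) (V : List (List Bool)) (p q : Int × Int)
    (hd : dims h w V) (hp : inb h w p) (hq : inb h w q) :
    (vAt (vset V p.1 p.2) q ↔ q = p ∨ vAt V q) := by
  obtain ⟨hlen, hrows⟩ := hd
  obtain ⟨hp1, hp2, hp3, hp4⟩ := hp
  obtain ⟨hq1, hq2, hq3, hq4⟩ := hq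
  have h1 : q.1.toNat < V.length := by omega
  have h1' : q.1.toNat < (vset V p.1 p.2).length := by simp [vset]; omega
  have hrowlen : ∀ (k : Nat) (hk : k < V.length), (V[k]'hk).length = w.toNat :=
    fun k hk => hrows _ (List.getElem_mem _)
  have h2 : q.2.toNat < (V[q.1.toNat]'h1).length := by rw [hrowlen]; omega
  have h2' : q.2.toNat < ((vset V p.1 p.2)[q.1.toNat]'h1').length := by
    simp only [vset, List.getElem_modify]
    split <;> simp [List.length_set, hrowlen] <;> omega
  rw [vAt, vAt, vget_getElem _ q hq1 hq3 h1' h2',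
    vget_getElem V q hq1 hq3 h1 h2]
  simp only [vset, List.getElem_modify]
  by_cases hcase : p.1.toNat = q.1.toNat
  · simp only [if_pos hcase, List.getElem_set]
    by_cases hc2 : p.2.toNat = q.2.toNat
    · rw [if_pos hc2]
      constructor
      · intro _; left; ext <;> omega
      · intro _; rfl
    · rw [if_neg hc2]
      constructor
      · intro hv; right; exact hv
      · rintro (rfl | hv)
        · omega
        · exact hv
  · simp only [if_neg hcase]
    constructor
    · intro hv; right; exact hv
    · rintro (rfl | hv)
      · omega
      · exact hv

lemma countFalse_vset (h w : Int) (V : List (List Bool)) (p : Int × Int)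
    (hd : dims h w V) (hp : inb h w p) (hv : ¬ vAt V p) :
    countFalse (vset V p.1 p.2) + 1 = countFalse V := by
  obtain ⟨hlen, hrows⟩ := hd
  obtain ⟨hp1, hp2, hp3, hp4⟩ := hp
  have h1 : p.1.toNat < V.length := by omega
  have h2 : p.2.toNat < (V[p.1.toNat]'h1).length := by
    rw [hrows _ (List.getElem_mem _)]; omega
  have hfalse : (V[p.1.toNat]'h1)[p.2.toNat]'h2 = false := by
    have := vget_getElem V p hp1 hp3 h1 h2
    unfold vAt at hv; rw [this] at hv; simpa using hv
  -- count of false in the set row drops by one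
  have hrowc : ((V[p.1.toNat]'h1).set p.2.toNat true).count false + 1
      = (V[p.1.toNat]'h1).count false := by
    rw [List.count_set h2]
    simp [hfalse]
    have : 1 ≤ (V[p.1.toNat]'h1).count false :=
      List.count_pos_iff.2 (by rw [← hfalse]; exact List.getElem_mem _)
    omega
  -- sum over modify
  unfold countFalse vset
  have : ∀ (L : List (List Bool)) (k : Nat) (hk : k < L.length),
      ((L.modify k (fun r => r.set p.2.toNat true)).map (fun r => r.count false)).sum
        + (L[k]'hk).count false
      = (L.map (fun r => r.count false)).sum
        + ((L[k]'hk).set p.2.toNat true).count false := by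
    intro L
    induction L with
    | nil => intro k hk; simp at hk
    | cons r L ih =>
      intro k hk
      cases k with
      | zero => simp [List.modify_cons]; omega
      | succ k =>
        have hmod : (r :: L).modify (k+1) (fun r => r.set p.2.toNat true)
            = r :: L.modify k (fun r => r.set p.2.toNat true) := by simp
        rw [hmod]
        simp only [List.map_cons, List.sum_cons, List.getElem_cons_succ]
        have := ih k (by simpa using Nat.lt_of_succ_lt_succ hk)
        omega
  have h3 := this V p.1.toNat h1
  omega

lemma countFalse_le (h w : Int) (V : List (List Bool)) (hd : dims h w V) :
    countFalse V ≤ h.toNat * w.toNat := by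
  obtain ⟨hlen, hrows⟩ := hd
  unfold countFalse
  calc (V.map (fun r => r.count false)).sum
      ≤ (V.map (fun r => r.length)).sum :=
        List.sum_le_sum (fun r _ => List.count_le_length)
    _ = h.toNat * w.toNat := by
        rw [show V.map (fun r => r.length) = List.replicate h.toNat w.toNat from
          List.eq_replicate_iff.2 ⟨by simpa using hlen,
            by intro b hb; obtain ⟨r, hr, rfl⟩ := List.mem_map.1 hb; exact hrows r hr⟩]
        rw [List.sum_replicate, smul_eq_mul]

lemma bfsFold_spec (out : List (List Int)) (h w colour ci cj : Int) :
    ∀ (ds : List (Int × Int)) (V : List (List Bool)) (q comp : List (Int × Int)),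
    dims h w V →
    ∃ xs,
      (ds.foldl (bfsStep out h w colour ci cj) (V, q, comp)).2.1 = q ++ xs ∧
      (ds.foldl (bfsStep out h w colour ci cj) (V, q, comp)).2.2 = comp ++ xs ∧
      dims h w (ds.foldl (bfsStep out h w colour ci cj) (V, q, comp)).1 ∧
      (q ++ xs).length + countFalse (ds.foldl (bfsStep out h w colour ci cj) (V, q, comp)).1
        = q.length + countFalse V ∧
      (∀ x ∈ xs, inb h w x ∧ gget out x.1 x.2 = colour ∧
        ∃ d ∈ ds, x = (ci + d.1, cj + d.2)) ∧
      (∀ p, inb h w p →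
        (vAt (ds.foldl (bfsStep out h w colour ci cj) (V, q, comp)).1 p ↔ vAt V p ∨ p ∈ xs)) ∧
      (∀ d ∈ ds, inb h w (ci + d.1, cj + d.2) → gget out (ci + d.1) (cj + d.2) = colour →
        vAt (ds.foldl (bfsStep out h w colour ci cj) (V, q, comp)).1 (ci + d.1, cj + d.2)) := by
  intro ds
  induction ds with
  | nil =>
    intro V q comp hd
    exact ⟨[], by simp, by simp, hd, by simp, by simp, by simp [vAt], by simp⟩
  | cons d ds ih =>
    intro V q comp hd
    by_cases hg : 0 ≤ ci + d.1 ∧ ci + d.1 < h ∧ 0 ≤ cj + d.2 ∧ cj + d.2 < w ∧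
        vget V (ci + d.1) (cj + d.2) = false
    · by_cases hc : gget out (ci + d.1) (cj + d.2) = colour
      · -- appended
        have hstep : bfsStep out h w colour ci cj (V, q, comp) d
            = (vset V (ci + d.1) (cj + d.2), q ++ [(ci + d.1, cj + d.2)],
               comp ++ [(ci + d.1, cj + d.2)]) := by
          simp only [bfsStep]; rw [if_pos hg, if_pos hc]
        have hinb : inb h w (ci + d.1, cj + d.2) := ⟨hg.1, hg.2.1, hg.2.2.1, hg.2.2.2.1⟩
        have hnv : ¬ vAt V (ci + d.1, cj + d.2) := by
          simp [vAt, hg.2.2.2.2]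
        have hd' := dims_vset h w V (ci + d.1, cj + d.2) hd
        obtain ⟨xs, e1, e2, e3, e4, e5, e6, e7⟩ :=
          ih (vset V (ci + d.1) (cj + d.2)) (q ++ [(ci + d.1, cj + d.2)])
            (comp ++ [(ci + d.1, cj + d.2)]) hd'
        simp only [List.foldl_cons, hstep]
        refine ⟨(ci + d.1, cj + d.2) :: xs, ?_, ?_, ?_, ?_, ?_, ?_, ?_⟩
        · rw [e1]; simp
        · rw [e2]; simp
        · exact e3
        · have hcf : countFalse (vset V (ci + d.1) (cj + d.2)) + 1 = countFalse V := by
            simpa using countFalse_vset h w V (ci + d.1, cj + d.2) hd hinb hnv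
          simp only [List.length_append, List.length_cons, List.length_nil] at e4 ⊢
          omega
        · intro x hx
          rcases List.mem_cons.1 hx with rfl | hx'
          · exact ⟨hinb, hc, ⟨d, List.mem_cons_self .., rfl⟩⟩
          · obtain ⟨h1, h2, dd, hdd, hx⟩ := e5 x hx'
            exact ⟨h1, h2, dd, List.mem_cons_of_mem _ hdd, hx⟩
        · intro p hp
          rw [e6 p hp, vAt_vset h w V (ci + d.1, cj + d.2) p hd hinb hp]
          constructor
          · rintro ((rfl | hv) | hxs)
            · exact Or.inr (List.mem_cons_self ..)
            · exact Or.inl hv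
            · exact Or.inr (List.mem_cons_of_mem _ hxs)
          · rintro (hv | hm)
            · exact Or.inl (Or.inr hv)
            · rcases List.mem_cons.1 hm with rfl | hm'
              · exact Or.inl (Or.inl rfl)
              · exact Or.inr hm'
        · intro dd hdd hi hcc
          rcases List.mem_cons.1 hdd with rfl | hdd'
          · exact (e6 _ hi).2
              (Or.inl ((vAt_vset h w V _ _ hd hinb hi).2 (Or.inl rfl)))
          · exact e7 dd hdd' hi hcc
      · -- in bounds, unvisited, wrong colour: no-op
        have hstep : bfsStep out h w colour ci cj (V, q, comp) d = (V, q, comp) := by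
          simp only [bfsStep]; rw [if_pos hg, if_neg hc]
        obtain ⟨xs, e1, e2, e3, e4, e5, e6, e7⟩ := ih V q comp hd
        simp only [List.foldl_cons, hstep]
        refine ⟨xs, e1, e2, e3, e4, ?_, e6, ?_⟩
        · intro x hx; obtain ⟨h1, h2, dd, hdd, hx⟩ := e5 x hx
          exact ⟨h1, h2, dd, List.mem_cons_of_mem _ hdd, hx⟩
        · intro dd hdd hi hcc
          rcases List.mem_cons.1 hdd with rfl | hdd'
          · exact absurd hcc hc
          · exact e7 dd hdd' hi hcc
    · -- guard false: out of bounds or already visited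
      have hstep : bfsStep out h w colour ci cj (V, q, comp) d = (V, q, comp) := by
        simp only [bfsStep]; rw [if_neg hg]
      obtain ⟨xs, e1, e2, e3, e4, e5, e6, e7⟩ := ih V q comp hd
      simp only [List.foldl_cons, hstep]
      refine ⟨xs, e1, e2, e3, e4, ?_, e6, ?_⟩
      · intro x hx; obtain ⟨h1, h2, dd, hdd, hx⟩ := e5 x hx
        exact ⟨h1, h2, dd, List.mem_cons_of_mem _ hdd, hx⟩
      · intro dd hdd hi hcc
        rcases List.mem_cons.1 hdd with rfl | hdd'
        · have hv : vAt V (ci + dd.1, cj + dd.2) := by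
            have hi' := hi
            simp only [inb] at hi'
            by_contra hnv
            exact hg ⟨hi'.1, hi'.2.1, hi'.2.2.1, hi'.2.2.2,
              by simpa [vAt] using hnv⟩
          exact (e6 _ hi).2 (Or.inl hv)
        · exact e7 dd hdd' hi hcc

lemma pyDirs_opp (d : Int × Int) (hd : d ∈ pyDirs) :
    ∃ d' ∈ pyDirs, d.1 + d'.1 = 0 ∧ d.2 + d'.2 = 0 := by
  fin_cases hd
  · exact ⟨(-1,0), by simp [pyDirs], by norm_num, by norm_num⟩
  · exact ⟨(1,0), by simp [pyDirs], by norm_num, by norm_num⟩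
  · exact ⟨(0,-1), by simp [pyDirs], by norm_num, by norm_num⟩
  · exact ⟨(0,1), by simp [pyDirs], by norm_num, by norm_num⟩

lemma bfsLoop_spec (out : List (List Int)) (h w colour : Int) (V0 : List (List Bool))
    (c : Int × Int) :
    ∀ (fuel : Nat) (V : List (List Bool)) (q comp : List (Int × Int)),
    q.length + countFalse V ≤ fuel →
    dims h w V →
    (∀ x ∈ comp, inb h w x ∧ gget out x.1 x.2 = colour) →
    (∀ x ∈ q, x ∈ comp) →
    (∀ x ∈ comp, x ∉ q → ∀ d ∈ pyDirs, inb h w (x.1 + d.1, x.2 + d.2) →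
      gget out (x.1 + d.1) (x.2 + d.2) = colour → vAt V (x.1 + d.1, x.2 + d.2)) →
    (∀ p, inb h w p → (vAt V p ↔ vAt V0 p ∨ p ∈ comp)) →
    (∀ x ∈ comp, x ≠ c → sameNbr out h w x) →
    dims h w (bfsLoop out h w colour fuel V q comp).1 ∧
    (∀ x ∈ comp, x ∈ (bfsLoop out h w colour fuel V q comp).2) ∧
    (∀ x ∈ (bfsLoop out h w colour fuel V q comp).2,
      inb h w x ∧ gget out x.1 x.2 = colour) ∧
    (∀ x ∈ (bfsLoop out h w colour fuel V q comp).2, ∀ d ∈ pyDirs,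
      inb h w (x.1 + d.1, x.2 + d.2) → gget out (x.1 + d.1) (x.2 + d.2) = colour →
      vAt (bfsLoop out h w colour fuel V q comp).1 (x.1 + d.1, x.2 + d.2)) ∧
    (∀ p, inb h w p →
      (vAt (bfsLoop out h w colour fuel V q comp).1 p ↔
        vAt V0 p ∨ p ∈ (bfsLoop out h w colour fuel V q comp).2)) ∧
    (∀ x ∈ (bfsLoop out h w colour fuel V q comp).2, x ≠ c → sameNbr out h w x) := by
  intro fuel
  induction fuel with
  | zero =>
    intro V q comp hle hd hcomp hq hcov he hnbr
    have hqnil : q = [] := by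
      cases q with
      | nil => rfl
      | cons a q' => simp at hle
    subst hqnil
    exact ⟨hd, fun x hx => hx, hcomp,
      fun x hx d hdd hi hcc => hcov x hx (by simp) d hdd hi hcc, he, hnbr⟩
  | succ fuel ih =>
    intro V q comp hle hd hcomp hq hcov he hnbr
    cases q with
    | nil =>
      exact ⟨hd, fun x hx => hx, hcomp,
        fun x hx d hdd hi hcc => hcov x hx (by simp) d hdd hi hcc, he, hnbr⟩
    | cons cc q' =>
      obtain ⟨ci, cj⟩ := cc
      have hpop : (ci, cj) ∈ comp := hq _ (by simp)
      obtain ⟨xs, e1, e2, e3, e4, e5, e6, e7⟩ :=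
        bfsFold_spec out h w colour ci cj pyDirs V q' comp hd
      have hgoal : bfsLoop out h w colour (fuel + 1) V ((ci, cj) :: q') comp
          = bfsLoop out h w colour fuel
              (bfsNbrs out h w colour ci cj (V, q', comp)).1
              (bfsNbrs out h w colour ci cj (V, q', comp)).2.1
              (bfsNbrs out h w colour ci cj (V, q', comp)).2.2 := rfl
      rw [hgoal]
      have hnb : bfsNbrs out h w colour ci cj (V, q', comp)
          = (pyDirs.foldl (bfsStep out h w colour ci cj) (V, q', comp)) := rfl
      rw [hnb] at *
      -- invariants for the recursive call
      have hle' : (pyDirs.foldl (bfsStep out h w colour ci cj) (V, q', comp)).2.1.length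
          + countFalse (pyDirs.foldl (bfsStep out h w colour ci cj) (V, q', comp)).1 ≤ fuel := by
        rw [e1]
        simp only [List.length_cons] at hle
        omega
      have hcomp' : ∀ x ∈ (pyDirs.foldl (bfsStep out h w colour ci cj) (V, q', comp)).2.2,
          inb h w x ∧ gget out x.1 x.2 = colour := by
        rw [e2]; intro x hx
        rcases List.mem_append.1 hx with hx | hx
        · exact hcomp x hx
        · exact ⟨(e5 x hx).1, (e5 x hx).2.1⟩
      have hq' : ∀ x ∈ (pyDirs.foldl (bfsStep out h w colour ci cj) (V, q', comp)).2.1,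
          x ∈ (pyDirs.foldl (bfsStep out h w colour ci cj) (V, q', comp)).2.2 := by
        rw [e1, e2]; intro x hx
        rcases List.mem_append.1 hx with hx | hx
        · exact List.mem_append.2 (Or.inl (hq x (by simp [hx])))
        · exact List.mem_append.2 (Or.inr hx)
      have hcov' : ∀ x ∈ (pyDirs.foldl (bfsStep out h w colour ci cj) (V, q', comp)).2.2,
          x ∉ (pyDirs.foldl (bfsStep out h w colour ci cj) (V, q', comp)).2.1 →
          ∀ d ∈ pyDirs, inb h w (x.1 + d.1, x.2 + d.2) →
          gget out (x.1 + d.1) (x.2 + d.2) = colour →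
          vAt (pyDirs.foldl (bfsStep out h w colour ci cj) (V, q', comp)).1
            (x.1 + d.1, x.2 + d.2) := by
        rw [e1, e2]; intro x hx hnq d hdd hi hcc
        rcases List.mem_append.1 hx with hx | hx
        · by_cases hxc : x = (ci, cj)
          · subst hxc
            exact e7 d hdd hi hcc
          · have hxq : x ∉ (ci, cj) :: q' := by
              intro hmem
              rcases List.mem_cons.1 hmem with h' | h'
              · exact hxc h'
              · exact hnq (List.mem_append.2 (Or.inl h'))
            have := hcov x hx hxq d hdd hi hcc
            exact ((e6 _ hi).2 (Or.inl this))
        · exact absurd (List.mem_append.2 (Or.inr hx)) hnq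
      have he' : ∀ p, inb h w p →
          (vAt (pyDirs.foldl (bfsStep out h w colour ci cj) (V, q', comp)).1 p ↔
            vAt V0 p ∨ p ∈ (pyDirs.foldl (bfsStep out h w colour ci cj) (V, q', comp)).2.2) := by
        intro p hp
        rw [e6 p hp, e2, he p hp, List.mem_append]
        tauto
      have hnbr' : ∀ x ∈ (pyDirs.foldl (bfsStep out h w colour ci cj) (V, q', comp)).2.2,
          x ≠ c → sameNbr out h w x := by
        rw [e2]; intro x hx hxc
        rcases List.mem_append.1 hx with hx | hx
        · exact hnbr x hx hxc
        · obtain ⟨hinbx, hcolx, d, hdd, rfl⟩ := e5 x hx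
          obtain ⟨d', hdd', hd1, hd2⟩ := pyDirs_opp d hdd
          refine ⟨d', hdd', ?_, ?_⟩
          · have : ((ci + d.1, cj + d.2).1 + d'.1, (ci + d.1, cj + d.2).2 + d'.2)
                = (ci, cj) := by
              simp only [Prod.mk.injEq]; constructor <;> omega
            rw [this]
            exact (hcomp _ hpop).1
          · have h1 : (ci + d.1, cj + d.2).1 + d'.1 = ci := by simp; omega
            have h2 : (ci + d.1, cj + d.2).2 + d'.2 = cj := by simp; omega
            rw [h1, h2, hcolx, (hcomp _ hpop).2]
      obtain ⟨c1, c2, c3, c4, c5, c6⟩ := ih _ _ _ hle' e3 hcomp' hq' hcov' he' hnbr'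
      exact ⟨c1, fun x hx => c2 x (by rw [e2]; exact List.mem_append.2 (Or.inl hx)),
        c3, c4, c5, c6⟩

lemma pyDirs_ne_zero (d : Int × Int) (hd : d ∈ pyDirs) : ¬(d.1 = 0 ∧ d.2 = 0) := by
  fin_cases hd <;> simp

lemma two_le_length_of_two_mem {α} {l : List α} {a b : α}
    (ha : a ∈ l) (hb : b ∈ l) (hne : a ≠ b) : 2 ≤ l.length := by
  obtain ⟨s, t, rfl⟩ := List.append_of_mem ha
  rcases List.mem_append.1 hb with hs | ht
  · have := List.length_pos_of_mem hs
    simp [List.length_append]; omega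
  · rcases List.mem_cons.1 ht with rfl | ht2
    · exact absurd rfl hne.symm
    · have := List.length_pos_of_mem ht2
      simp [List.length_append]; omega

lemma hasNbrB_iff (out : List (List Int)) (h w : Int) (p : Int × Int) :
    hasNbrB out h w p.1 p.2 (gget out p.1 p.2) = true ↔ sameNbr out h w p := by
  simp [hasNbrB, sameNbr, inb, List.any_eq_true, and_assoc]

lemma bfsFold_id (out : List (List Int)) (h w colour ci cj : Int)
    (ds : List (Int × Int)) (st : List (List Bool) × List (Int × Int) × List (Int × Int))
    (hno : ∀ d ∈ ds, inb h w (ci + d.1, cj + d.2) →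
      gget out (ci + d.1) (cj + d.2) ≠ colour) :
    ds.foldl (bfsStep out h w colour ci cj) st = st := by
  induction ds generalizing st with
  | nil => rfl
  | cons d ds ih =>
    have hst : bfsStep out h w colour ci cj st d = st := by
      simp only [bfsStep]
      by_cases hg : 0 ≤ ci + d.1 ∧ ci + d.1 < h ∧ 0 ≤ cj + d.2 ∧ cj + d.2 < w ∧
          vget st.1 (ci + d.1) (cj + d.2) = false
      · rw [if_pos hg, if_neg (hno d (by simp) ⟨hg.1, hg.2.1, hg.2.2.1, hg.2.2.2.1⟩)]
      · rw [if_neg hg]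
    rw [List.foldl_cons, hst]
    exact ih st (fun d hd => hno d (by simp [hd]))

lemma bfsLoop_empty (out : List (List Int)) (h w colour : Int) (fuel : Nat)
    (V : List (List Bool)) (comp : List (Int × Int)) :
    bfsLoop out h w colour fuel V [] comp = (V, comp) := by
  cases fuel <;> rfl

lemma scan_eq (out : List (List Int)) (h w bg : Int) :
    ∀ (R : List (Int × Int)) (V : List (List Bool)) (s : List (Int × Int × Int)),
    R.Nodup → (∀ p ∈ R, inb h w p) → dims h w V → clos out h w V →
    (∀ p ∈ R, vAt V p → sameNbr out h w p) →
    (R.foldl (scanStepA out h w bg) (V, s)).2 = R.foldl (scanStepB out h w bg) s := by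
  intro R
  induction R with
  | nil => intro V s _ _ _ _ _; rfl
  | cons p R ih =>
    intro V s hnd hinbR hd hcl hrem
    have hpin : inb h w p := hinbR p (by simp)
    have hpR : p ∉ R := (List.nodup_cons.1 hnd).1
    have hndR := (List.nodup_cons.1 hnd).2
    have hinbR' : ∀ q ∈ R, inb h w q := fun q hq => hinbR q (by simp [hq])
    rw [List.foldl_cons, List.foldl_cons]
    by_cases hv : vget V p.1 p.2 = true
    · -- A skips because visited; B skips too (background or an equal neighbour exists)
      have hA : scanStepA out h w bg (V, s) p = (V, s) := by
        simp only [scanStepA]; rw [if_pos (Or.inl hv)]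
      have hB : scanStepB out h w bg s p = s := by
        simp only [scanStepB]
        by_cases hbg : gget out p.1 p.2 = bg
        · rw [if_pos hbg]
        · rw [if_neg hbg, if_pos ((hasNbrB_iff out h w p).2 (hrem p (by simp) hv))]
      rw [hA, hB]
      exact ih V s hndR hinbR' hd hcl (fun q hq => hrem q (by simp [hq]))
    · by_cases hbg : gget out p.1 p.2 = bg
      · have hA : scanStepA out h w bg (V, s) p = (V, s) := by
          simp only [scanStepA]; rw [if_pos (Or.inr hbg)]
        have hB : scanStepB out h w bg s p = s := by
          simp only [scanStepB]; rw [if_pos hbg]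
        rw [hA, hB]
        exact ih V s hndR hinbR' hd hcl (fun q hq => hrem q (by simp [hq]))
      · -- A runs its BFS from p
        have hnv : ¬ vAt V p := hv
        have hd1 := dims_vset h w V p hd
        have hspec := bfsLoop_spec out h w (gget out p.1 p.2) V p
          (h.toNat * w.toNat + 1) (vset V p.1 p.2) [(p.1, p.2)] [(p.1, p.2)]
          (by have := countFalse_le h w (vset V p.1 p.2) hd1; simp; omega)
          hd1
          (by intro x hx; rcases List.mem_singleton.1 hx with rfl; exact ⟨hpin, rfl⟩)
          (by intro x hx; exact hx)
          (by intro x hx hnx; rcases List.mem_singleton.1 hx with rfl; simp at hnx)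
          (by intro q hq
              rw [show ((p.1, p.2) : Int × Int) = p from rfl]
              rw [vAt_vset h w V p q hd hpin hq]
              simp [List.mem_singleton]
              tauto)
          (by intro x hx hne; rcases List.mem_singleton.1 hx with rfl; simp at hne)
        obtain ⟨c1, c2, c3, c4, c5, c6⟩ := hspec
        set r := bfsLoop out h w (gget out p.1 p.2) (h.toNat * w.toNat + 1)
          (vset V p.1 p.2) [(p.1, p.2)] [(p.1, p.2)] with hr
        by_cases hn : sameNbr out h w p
        · -- neighbour exists: the component has ≥ 2 cells, neither side records p
          obtain ⟨d0, hd0, hinb0, hcol0⟩ := hn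
          have hne0 : (p.1 + d0.1, p.2 + d0.2) ≠ p := by
            intro hEq
            have h1 : p.1 + d0.1 = p.1 := congrArg Prod.fst hEq
            have h2 : p.2 + d0.2 = p.2 := congrArg Prod.snd hEq
            exact pyDirs_ne_zero d0 hd0 ⟨by omega, by omega⟩
          have hnv0 : ¬ vAt V (p.1 + d0.1, p.2 + d0.2) := by
            intro hvis
            obtain ⟨d', hd', e1', e2'⟩ := pyDirs_opp d0 hd0
            have htgt : ((p.1 + d0.1) + d'.1, (p.2 + d0.2) + d'.2) = p := by
              have : (p.1 + d0.1) + d'.1 = p.1 := by omega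
              have h2 : (p.2 + d0.2) + d'.2 = p.2 := by omega
              simp [this, h2]
            have ha : p.1 + d0.1 + d'.1 = p.1 := by omega
            have hb : p.2 + d0.2 + d'.2 = p.2 := by omega
            have := hcl (p.1 + d0.1, p.2 + d0.2) hinb0 hvis d' hd'
              (by rw [show ((p.1 + d0.1, p.2 + d0.2).1 + d'.1,
                    (p.2 + d0.2) + d'.2) = p from htgt] at *
                  exact htgt ▸ hpin)
              (by show gget out (p.1 + d0.1 + d'.1) (p.2 + d0.2 + d'.2) = _
                  rw [ha, hb, hcol0])
            rw [htgt] at this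
            exact hnv this
          have hpmem : ((p.1, p.2) : Int × Int) ∈ r.2 := c2 _ (by simp)
          have hvis0 : vAt r.1 (p.1 + d0.1, p.2 + d0.2) := by
            have := c4 (p.1, p.2) hpmem d0 hd0
            exact this hinb0 hcol0
          have hmem0 : (p.1 + d0.1, p.2 + d0.2) ∈ r.2 := by
            have := (c5 _ hinb0).1 hvis0
            rcases this with hvv | hm
            · exact absurd hvv hnv0
            · exact hm
          have hlen2 : r.2.length ≠ 1 := by
            have : 2 ≤ r.2.length := two_le_length_of_two_mem hpmem hmem0
              (by intro hEq; exact hne0 (by rw [← hEq]))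
            omega
          have hA : scanStepA out h w bg (V, s) p = (r.1, s) := by
            simp only [scanStepA]
            rw [if_neg (by push_neg; exact ⟨hv, hbg⟩), ← hr, if_neg hlen2]
          have hB : scanStepB out h w bg s p = s := by
            simp only [scanStepB]
            rw [if_neg hbg, if_pos ((hasNbrB_iff out h w p).2 ⟨d0, hd0, hinb0, hcol0⟩)]
          rw [hA, hB]
          refine ih r.1 s hndR hinbR' c1 ?_ ?_
          · -- closure of the grown visited set
            intro q hq hvq d hdd hit hct
            rcases (c5 q hq).1 hvq with hvv | hm
            · exact (c5 _ hit).2 (Or.inl (hcl q hq hvv d hdd hit hct))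
            · have hcq : gget out q.1 q.2 = gget out p.1 p.2 := (c3 q hm).2
              exact c4 q hm d hdd hit (by rw [hct, hcq])
          · intro q hq hvq
            rcases (c5 q (hinbR' q hq)).1 hvq with hvv | hm
            · exact hrem q (by simp [hq]) hvv
            · refine c6 q hm ?_
              intro hEq; exact hpR (hEq ▸ hq)
        · -- no neighbour: the BFS finds the singleton component, both record p
          have hno : ∀ d ∈ pyDirs, inb h w (p.1 + d.1, p.2 + d.2) →
              gget out (p.1 + d.1) (p.2 + d.2) ≠ gget out p.1 p.2 := by
            intro d hdd hit hEq
            exact hn ⟨d, hdd, hit, hEq⟩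
          have hrstep : r = (vset V p.1 p.2, [(p.1, p.2)]) := by
            rw [hr]
            have h1 : bfsLoop out h w (gget out p.1 p.2) (h.toNat * w.toNat + 1)
                (vset V p.1 p.2) [(p.1, p.2)] [(p.1, p.2)]
                = bfsLoop out h w (gget out p.1 p.2) (h.toNat * w.toNat)
                  (bfsNbrs out h w (gget out p.1 p.2) p.1 p.2
                    (vset V p.1 p.2, [], [(p.1, p.2)])).1
                  (bfsNbrs out h w (gget out p.1 p.2) p.1 p.2
                    (vset V p.1 p.2, [], [(p.1, p.2)])).2.1
                  (bfsNbrs out h w (gget out p.1 p.2) p.1 p.2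
                    (vset V p.1 p.2, [], [(p.1, p.2)])).2.2 := rfl
            rw [h1, show bfsNbrs out h w (gget out p.1 p.2) p.1 p.2
                (vset V p.1 p.2, [], [(p.1, p.2)])
                = (vset V p.1 p.2, [], [(p.1, p.2)]) from
              bfsFold_id out h w (gget out p.1 p.2) p.1 p.2 pyDirs _ hno]
            exact bfsLoop_empty out h w (gget out p.1 p.2) _ _ _
          have hA : scanStepA out h w bg (V, s) p
              = (vset V p.1 p.2, s ++ [(p.1, p.2, gget out p.1 p.2)]) := by
            simp only [scanStepA]
            rw [if_neg (by push_neg; exact ⟨hv, hbg⟩), ← hr, hrstep]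
            simp
          have hB : scanStepB out h w bg s p
              = s ++ [(p.1, p.2, gget out p.1 p.2)] := by
            simp only [scanStepB]
            rw [if_neg hbg, if_neg (by
              intro hfalse
              exact hn ((hasNbrB_iff out h w p).1 hfalse))]
          rw [hA, hB]
          refine ih (vset V p.1 p.2) (s ++ [(p.1, p.2, gget out p.1 p.2)])
            hndR hinbR' hd1 ?_ ?_
          · intro q hq hvq d hdd hit hct
            have := (vAt_vset h w V p q hd hpin hq).1 hvq
            rcases this with rfl | hvv
            · exact absurd hct (hno d hdd hit)
            · exact (vAt_vset h w V p _ hd hpin hit).2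
                (Or.inr (hcl q hq hvv d hdd hit hct))
          · intro q hq hvq
            rcases (vAt_vset h w V p q hd hpin (hinbR' q hq)).1 hvq with rfl | hvv
            · exact absurd hq hpR
            · exact hrem q (by simp [hq]) hvv

lemma foldl_foldl_product {α β σ : Type} (f : σ → α × β → σ)
    (is : List α) (js : List β) (init : σ) :
    is.foldl (fun s i => js.foldl (fun s j => f s (i, j)) s) init
      = (is ×ˢ js).foldl f init := by
  induction is generalizing init with
  | nil => rfl
  | cons i is ih =>
    simp only [List.foldl_cons, List.product_cons, List.foldl_append, List.foldl_map, ih]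

lemma pyGetD_all_eq {α : Type} (xs : List α) (i : Int) (d : α)
    (hall : ∀ x ∈ xs, x = d) : PySem.List.pyGetD xs i d = d := by
  cases hx : PySem.List.pyGet? xs i with
  | none => exact PySem.List.pyGetD_of_none xs i d hx
  | some b =>
    rw [PySem.List.pyGetD, hx]
    exact hall b (PySem.List.mem_of_pyGet?_eq_some xs hx)

lemma vAt_init (hN wN : Nat) (p : Int × Int) :
    ¬ vAt (List.replicate hN (List.replicate wN false)) p := by
  unfold vAt vget
  rw [pyGetD_all_eq]
  · simp
  · intro b hb
    have hrow : PySem.List.pyGetD (List.replicate hN (List.replicate wN false)) p.1 []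
        = List.replicate wN false ∨
        PySem.List.pyGetD (List.replicate hN (List.replicate wN false)) p.1 [] = [] := by
      cases hx : PySem.List.pyGet? (List.replicate hN (List.replicate wN false)) p.1 with
      | none => exact Or.inr (PySem.List.pyGetD_of_none _ _ _ hx)
      | some row =>
        left
        rw [PySem.List.pyGetD, hx]
        exact List.eq_of_mem_replicate (PySem.List.mem_of_pyGet?_eq_some _ hx)
    rcases hrow with hrow | hrow <;> rw [hrow] at hb
    · exact List.eq_of_mem_replicate hb
    · simp at hb

lemma phase1_eq (out : List (List Int)) (h w bg : Int) :
    phase1A out h w bg = phase1B out h w bg := by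
  unfold phase1A phase1B
  rw [foldl_foldl_product (scanStepA out h w bg), foldl_foldl_product (scanStepB out h w bg)]
  apply scan_eq
  · exact List.Nodup.product (PySem.List.nodup_pyRange_one 0 h)
      (PySem.List.nodup_pyRange_one 0 w)
  · intro p hp
    obtain ⟨i, j⟩ := p
    rw [List.mem_product] at hp
    have h1 := (PySem.List.mem_pyRange_one).1 hp.1
    have h2 := (PySem.List.mem_pyRange_one).1 hp.2
    exact ⟨h1.1, h1.2, h2.1, h2.2⟩
  · constructor
    · simp
    · intro r hr
      rw [List.eq_of_mem_replicate hr]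
      simp
  · intro p hp hfalse
    exact absurd hfalse (vAt_init _ _ p)
  · intro p hp hfalse
    exact absurd hfalse (vAt_init _ _ p)

-- ===== VERDICT (by name: the statement is the Claim_ definition above) =====
theorem transform_spec : Claim_equal_transform := by
  intro grid _ _
  unfold Spec_transform transform transform_alt
  simp only [phase1_eq]
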